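-- pv_equiv track=rewrite | github.com/genry86/Chess-Game-with-AI | RAG/parse_single_pgn.py | split_into_game_blocks
-- ===== SOURCE A (Python) =====
-- from typing import List, Dict, Optional, Tuple
-- from typing import List, Tuple
--
-- def split_into_game_blocks(pgn_text: str) -> List[str]:
--     """
--     Split the PGN text into game blocks.
--     We detect a new game when a line starts with '[' (tag pair).
--     We collect lines until the next tag-start or EOF.
--     """
--     lines = pgn_text.splitlines()
--     games: List[List[str]] = []
--     cur: List[str] = []
--
--     def flush():
--         if cur and any(line.strip() for line in cur):
--             games.append(cur.copy())
--
--     for line in lines: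
--         if line.startswith("[") and line.endswith("]") and cur:
--             # New tags -> new game begins, flush previous
--             flush()
--             cur = [line]
--         else:
--             cur.append(line)
--
--     flush()
--     return ["\n".join(g) for g in games]
-- ===== SOURCE B (Python) =====
-- from typing import List
--
--
-- def split_into_game_blocks(pgn_text: str) -> List[str]:
--     """Recursive chunking: a tag line (other than a chunk's first line) starts a
--     new chunk; blank-only chunks are dropped at the end."""
--
--     def is_tag(line: str) -> bool:
--         return line.startswith("[") and line.endswith("]")
--
--     def chunks(lines: List[str]) -> List[List[str]]:
--         if not lines:
--             return []
--         i = 1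
--         while i < len(lines) and not is_tag(lines[i]):
--             i += 1
--         return [lines[:i]] + chunks(lines[i:])
--
--     return ["\n".join(c) for c in chunks(pgn_text.splitlines())
--             if any(l.strip() for l in c)]
-- ===== Notes on version B (the rewrite author's own statement) =====
-- stated objective: alternative
-- what changed: Replaces A's single-pass accumulator with flush callbacks by a recursive chunker that splits the line list at tag-line boundaries and then filters/joins the chunks in one comprehension.
import Mathlib
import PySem

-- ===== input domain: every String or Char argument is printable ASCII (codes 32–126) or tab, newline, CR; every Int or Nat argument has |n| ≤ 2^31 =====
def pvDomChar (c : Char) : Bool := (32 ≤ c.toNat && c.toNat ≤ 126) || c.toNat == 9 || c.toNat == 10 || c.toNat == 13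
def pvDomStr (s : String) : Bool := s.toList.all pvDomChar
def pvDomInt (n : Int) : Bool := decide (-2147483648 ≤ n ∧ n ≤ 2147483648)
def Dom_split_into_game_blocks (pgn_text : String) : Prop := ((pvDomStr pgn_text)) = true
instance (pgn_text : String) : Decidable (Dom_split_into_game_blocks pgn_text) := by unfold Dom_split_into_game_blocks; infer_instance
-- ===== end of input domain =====

-- B replaces A's accumulator-with-flush loop by a recursive chunker that splits the
-- line list at tag-line boundaries and then filters/joins the chunks (alternative
-- decomposition, same cost).

-- ===== PORT A =====
-- flush(): append cur if nonempty and some line is nonblank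
def pvFlushA (games : List (List String)) (cur : List String) : List (List String) :=
  if !cur.isEmpty && cur.any (fun line => PySem.Str.strip line != "") then games ++ [cur] else games

-- one iteration of A's for-loop over lines, state (games, cur)
def pvStepA (st : List (List String) × List String) (line : String) :
    List (List String) × List String :=
  if PySem.Str.startswith line "[" && PySem.Str.endswith line "]" && !st.2.isEmpty then
    (pvFlushA st.1 st.2, [line])
  else
    (st.1, st.2 ++ [line])

def split_into_game_blocks (pgn_text : String) : List String :=
  let lines := PySem.Str.splitlines pgn_text
  let st := lines.foldl pvStepA ([], [])
  (pvFlushA st.1 st.2).map (fun g => PySem.Str.join "\n" g)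

-- ===== PORT B =====
def pvIsTag (line : String) : Bool :=
  PySem.Str.startswith line "[" && PySem.Str.endswith line "]"

-- Source B's chunks(): the index-scan `while i < len(lines) and not is_tag(lines[i])`
-- plus the slices lines[:i] / lines[i:] are exactly takeWhile/dropWhile on the tail.
def pvChunks : List String → List (List String)
  | [] => []
  | h :: t =>
      (h :: t.takeWhile (fun l => !pvIsTag l)) :: pvChunks (t.dropWhile (fun l => !pvIsTag l))
  termination_by ls => ls.length
  decreasing_by
    exact Nat.lt_succ_of_le (List.length_dropWhile_le _ _)

-- truthiness of `any(l.strip() for l in c)`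
def pvKeep (c : List String) : Bool := c.any (fun l => PySem.Str.strip l != "")

def split_into_game_blocks_alt (pgn_text : String) : List String :=
  ((pvChunks (PySem.Str.splitlines pgn_text)).filter pvKeep).map
    (fun c => PySem.Str.join "\n" c)

-- ===== PRECONDITION & SPEC =====
def Spec_split_into_game_blocks (pgn_text : String) (out : List String) : Prop := out = split_into_game_blocks_alt pgn_text
instance (pgn_text : String) (out : List String) : Decidable (Spec_split_into_game_blocks pgn_text out) := by unfold Spec_split_into_game_blocks; infer_instance

-- ===== CLAIM (what is proved, stated in full; the proofs are below) =====
def Claim_equal_split_into_game_blocks : Prop := ∀ (pgn_text : String), Dom_split_into_game_blocks pgn_text → Spec_split_into_game_blocks pgn_text (split_into_game_blocks pgn_text)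

-- ===== LEMMAS AND PROOFS =====

-- proof-only intermediate: chunks of the remaining lines given open block `cur`
def pvChunksFrom (cur : List String) : List String → List (List String)
  | [] => [cur]
  | l :: rest => if pvIsTag l then cur :: pvChunksFrom [l] rest else pvChunksFrom (cur ++ [l]) rest

lemma stepA_eq (games : List (List String)) (cur : List String) (l : String) :
    pvStepA (games, cur) l =
      if pvIsTag l && !cur.isEmpty then (pvFlushA games cur, [l]) else (games, cur ++ [l]) := rfl

lemma flushA_filter (games : List (List String)) (cur : List String) (h : cur ≠ []) :
    pvFlushA games cur = games ++ List.filter pvKeep [cur] := by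
  have hne : cur.isEmpty = false := by simp [h]
  simp only [pvFlushA, pvKeep, List.filter_cons, List.filter_nil, hne, Bool.not_false,
    Bool.true_and]
  cases cur.any (fun line => PySem.Str.strip line != "") <;> simp

lemma foldA_eq (ls : List String) : ∀ (games : List (List String)) (cur : List String),
    cur ≠ [] →
    pvFlushA (ls.foldl pvStepA (games, cur)).1 (ls.foldl pvStepA (games, cur)).2
      = games ++ (pvChunksFrom cur ls).filter pvKeep := by
  induction ls with
  | nil =>
      intro games cur h
      simpa [pvChunksFrom] using flushA_filter games cur h
  | cons l rest ih =>
      intro games cur h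
      have hne : cur.isEmpty = false := by simp [h]
      rw [List.foldl_cons, stepA_eq]
      cases htag : pvIsTag l with
      | true =>
          rw [if_pos (by simp [hne]), ih _ [l] (by simp), flushA_filter games cur h]
          simp only [pvChunksFrom, if_pos htag, List.filter_cons, List.filter_nil,
            List.append_assoc]
          cases pvKeep cur <;> simp
      | false =>
          rw [if_neg (by simp), ih _ (cur ++ [l]) (by simp)]
          simp [pvChunksFrom, htag]

lemma chunksFrom_eq (ls : List String) : ∀ (cur : List String),
    pvChunksFrom cur ls
      = (cur ++ ls.takeWhile (fun l => !pvIsTag l))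
          :: pvChunks (ls.dropWhile (fun l => !pvIsTag l)) := by
  induction ls with
  | nil => intro cur; simp [pvChunksFrom, pvChunks]
  | cons l rest ih =>
      intro cur
      cases htag : pvIsTag l with
      | true => simp [pvChunksFrom, htag, List.takeWhile, List.dropWhile, ih, pvChunks]
      | false => simp [pvChunksFrom, htag, List.takeWhile, List.dropWhile, ih]

-- ===== VERDICT (by name: the statement is the Claim_ definition above) =====
theorem split_into_game_blocks_spec : Claim_equal_split_into_game_blocks := by
  intro pgn_text _
  unfold Spec_split_into_game_blocks
  simp only [split_into_game_blocks, split_into_game_blocks_alt]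
  cases hl : PySem.Str.splitlines pgn_text with
  | nil => simp [pvChunks, pvFlushA]
  | cons h t =>
      have hstep : pvStepA ([], []) h = ([], [h]) := by rw [stepA_eq]; simp
      rw [List.foldl_cons, hstep, foldA_eq t [] [h] (by simp), chunksFrom_eq]
      simp [pvChunks]
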